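-- pv_equiv track=rewrite | github.com/Aaron1B/Reto9-04 | hanoi/ui.py | format_towers
-- ===== SOURCE A (Python) =====
-- def format_towers(towers):
--     output = ""
--     max_height = max(len(t) for t in towers)
--     for level in reversed(range(max_height)):
--         for tower in towers:
--             if len(tower) > level:
--                 output += f"  {tower[level]}  "
--             else:
--                 output += "     "
--         output += "\n"
--     output += " [0]  [1]  [2] "
--     return output
-- ===== SOURCE B (Python) =====
-- def format_towers(towers):
--     max_height = max(len(t) for t in towers)
--     # column-by-column: one rendered cell list per tower (top level down to 0), then transpose by index
--     columns = [[f"  {t[l]}  " if l < len(t) else "     "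
--                 for l in range(max_height - 1, -1, -1)]
--                for t in towers]
--     rows = ["".join(col[i] for col in columns) for i in range(max_height)]
--     return "".join(r + "\n" for r in rows) + " [0]  [1]  [2] "
-- ===== Notes on version B (the rewrite author's own statement) =====
-- stated objective: alternative
-- what changed: B builds a rendered cell column per tower (top level down to 0) and then transposes by index to assemble rows, instead of A's single string accumulated cell-by-cell in row-major order.
import Mathlib
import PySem

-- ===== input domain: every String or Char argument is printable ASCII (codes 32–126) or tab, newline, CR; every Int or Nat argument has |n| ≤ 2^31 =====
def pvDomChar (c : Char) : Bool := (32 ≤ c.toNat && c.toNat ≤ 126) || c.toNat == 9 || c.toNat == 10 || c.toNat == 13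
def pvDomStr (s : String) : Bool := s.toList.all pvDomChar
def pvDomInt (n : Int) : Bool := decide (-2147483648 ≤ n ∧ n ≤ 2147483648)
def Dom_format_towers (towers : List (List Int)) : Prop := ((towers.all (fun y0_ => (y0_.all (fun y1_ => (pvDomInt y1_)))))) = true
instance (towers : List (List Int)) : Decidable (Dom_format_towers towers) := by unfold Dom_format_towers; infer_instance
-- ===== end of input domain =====

-- B renders each tower as a column of cells and transposes by index (column-major build),
-- instead of A's single accumulating string written row by row: objective 'alternative'.


-- ===== PORT A =====
def format_towers (towers : List (List Int)) : String :=
  -- max(len(t) for t in towers): for towers ≠ [] (Pre_) Python's max equals this running-max fold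
  -- started at 0, since every length is ≥ 0; on towers = [] Python raises ValueError (excluded by Pre_)
  let max_height : Nat := towers.foldl (fun m t => max m t.length) 0
  let output : String :=
    ((PySem.List.pyRange 0 (max_height : Int) 1).reverse).foldl (fun output level =>
      (towers.foldl (fun output tower =>
        if (tower.length : Int) > level then
          -- tower[level]: the guard makes the index in range, so the default of pyGetD is never used
          output ++ ("  " ++ PySem.Int.toStr (PySem.List.pyGetD tower level 0) ++ "  ")
        else
          output ++ "     ") output) ++ "\n") ""
  output ++ " [0]  [1]  [2] "

-- ===== PORT B =====
def format_towers_alt (towers : List (List Int)) : String :=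
  -- same Python line 'max(len(t) for t in towers)' as in A, ported the same way (Pre_: towers ≠ [])
  let max_height : Nat := towers.foldl (fun m t => max m t.length) 0
  let columns : List (List String) := towers.map (fun t =>
    (PySem.List.pyRange ((max_height : Int) - 1) (-1) (-1)).map (fun l =>
      if l < (t.length : Int) then "  " ++ PySem.Int.toStr (PySem.List.pyGetD t l 0) ++ "  "
      else "     "))
  let rows : List String := (PySem.List.pyRange 0 (max_height : Int) 1).map (fun i =>
    -- col[i]: i ∈ range(max_height) and every column has length max_height, so in range
    PySem.Str.join "" (columns.map (fun col => PySem.List.pyGetD col i "")))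
  PySem.Str.join "" (rows.map (fun r => r ++ "\n")) ++ " [0]  [1]  [2] "

-- ===== PRECONDITION & SPEC =====
-- Pre_ excludes only towers = [], on which both A and B raise ValueError from max() on an empty generator.
def Pre_format_towers (towers : List (List Int)) : Prop := towers ≠ []
instance (towers : List (List Int)) : Decidable (Pre_format_towers towers) := by unfold Pre_format_towers; infer_instance
def pvWitness_format_towers : List (List Int) := [[3, 2], [1], []]
def Spec_format_towers (towers : List (List Int)) (out : String) : Prop := out = format_towers_alt towers
instance (towers : List (List Int)) (out : String) : Decidable (Spec_format_towers towers out) := by unfold Spec_format_towers; infer_instance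

-- ===== CLAIM (what is proved, stated in full; the proofs are below) =====
def Claim_equal_format_towers : Prop := ∀ (towers : List (List Int)), Dom_format_towers towers → Pre_format_towers towers → Spec_format_towers towers (format_towers towers)

-- ===== LEMMAS AND PROOFS =====

-- one rendered cell (shared shape of both ports' cell expressions)
def pvCell (t : List Int) (l : Int) : String :=
  if l < (t.length : Int) then "  " ++ PySem.Int.toStr (PySem.List.pyGetD t l 0) ++ "  " else "     "

-- one rendered row
def pvRow (towers : List (List Int)) (l : Int) : String :=
  PySem.Str.join "" (towers.map (fun t => pvCell t l))

theorem pv_sjoin_nil : PySem.Str.join "" ([] : List String) = "" := by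
  apply String.toList_injective
  simp [PySem.Chars.join_nil]

theorem pv_sjoin_cons (s : String) (r : List String) :
    PySem.Str.join "" (s :: r) = s ++ PySem.Str.join "" r := by
  apply String.toList_injective
  cases r with
  | nil => simp [PySem.Chars.join_singleton, PySem.Chars.join_nil]
  | cons t ts => simp [PySem.Chars.join_cons_cons]

theorem pv_foldl_app {α : Type} (l : List α) (g : α → String) (acc : String) :
    l.foldl (fun o x => o ++ g x) acc = acc ++ PySem.Str.join "" (l.map g) := by
  induction l generalizing acc with
  | nil => simp [pv_sjoin_nil]
  | cons x xs ih => simp [List.foldl_cons, ih, pv_sjoin_cons, String.append_assoc]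

-- A's result in canonical join form
theorem pv_A_canon (towers : List (List Int)) :
    format_towers towers =
      PySem.Str.join "" (((PySem.List.pyRange 0 ((towers.foldl (fun m t => max m t.length) 0 : Nat) : Int) 1).reverse).map
        (fun l => pvRow towers l ++ "\n")) ++ " [0]  [1]  [2] " := by
  unfold format_towers
  dsimp only
  -- rewrite inner foldl body to 'o ++ pvCell t level'
  have h1 : ∀ (level : Int) (o : String),
      towers.foldl (fun output tower =>
        if (tower.length : Int) > level then
          output ++ ("  " ++ PySem.Int.toStr (PySem.List.pyGetD tower level 0) ++ "  ")
        else output ++ "     ") o = o ++ pvRow towers level := by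
    intro level o
    have hfun : (fun (output : String) (tower : List Int) =>
        if (tower.length : Int) > level then
          output ++ ("  " ++ PySem.Int.toStr (PySem.List.pyGetD tower level 0) ++ "  ")
        else output ++ "     ") = (fun o t => o ++ pvCell t level) := by
      funext o t
      by_cases hc : level < (t.length : Int) <;> simp [pvCell, hc]
    rw [hfun, pv_foldl_app]
    rfl
  have h2 : ∀ (acc : String),
      ((PySem.List.pyRange 0 ((towers.foldl (fun m t => max m t.length) 0 : Nat) : Int) 1).reverse).foldl
        (fun output level =>
          (towers.foldl (fun output tower =>
            if (tower.length : Int) > level then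
              output ++ ("  " ++ PySem.Int.toStr (PySem.List.pyGetD tower level 0) ++ "  ")
            else output ++ "     ") output) ++ "\n") acc
      = acc ++ PySem.Str.join ""
          (((PySem.List.pyRange 0 ((towers.foldl (fun m t => max m t.length) 0 : Nat) : Int) 1).reverse).map
            (fun l => pvRow towers l ++ "\n")) := by
    intro acc
    have hfun : (fun (output : String) (level : Int) =>
        (towers.foldl (fun output tower =>
          if (tower.length : Int) > level then
            output ++ ("  " ++ PySem.Int.toStr (PySem.List.pyGetD tower level 0) ++ "  ")
          else output ++ "     ") output) ++ "\n")
        = (fun o level => o ++ (pvRow towers level ++ "\n")) := by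
      funext o level
      rw [h1 level o, String.append_assoc]
    rw [hfun, pv_foldl_app]
  rw [h2]
  simp

-- the countdown range of B is A's reversed range
theorem pv_levels_eq (h : Nat) :
    PySem.List.pyRange ((h : Int) - 1) (-1) (-1) = (PySem.List.pyRange 0 (h : Int) 1).reverse := by
  rw [PySem.List.pyRange_neg_one_eq_reverse]
  norm_num

-- B's result in the same canonical join form
theorem pv_B_canon (towers : List (List Int)) :
    format_towers_alt towers =
      PySem.Str.join "" (((PySem.List.pyRange 0 ((towers.foldl (fun m t => max m t.length) 0 : Nat) : Int) 1).reverse).map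
        (fun l => pvRow towers l ++ "\n")) ++ " [0]  [1]  [2] " := by
  unfold format_towers_alt
  dsimp only
  set h : Nat := towers.foldl (fun m t => max m t.length) 0 with hh
  set levels : List Int := (PySem.List.pyRange 0 (h : Int) 1).reverse with hlev
  have hlen : levels.length = h := by
    simp [hlev, PySem.List.length_pyRange_one]
  congr 1
  -- columns rewritten through levels
  rw [pv_levels_eq]
  -- rows = levels.map (pvRow towers)
  have hrows : (PySem.List.pyRange 0 (h : Int) 1).map (fun i =>
      PySem.Str.join "" ((towers.map (fun t => levels.map (fun l =>
        if l < (t.length : Int) then "  " ++ PySem.Int.toStr (PySem.List.pyGetD t l 0) ++ "  "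
        else "     "))).map (fun col => PySem.List.pyGetD col i "")))
      = levels.map (fun l => pvRow towers l) := by
    have hstep : ∀ i ∈ PySem.List.pyRange 0 (h : Int) 1,
        PySem.Str.join "" ((towers.map (fun t => levels.map (fun l =>
          if l < (t.length : Int) then "  " ++ PySem.Int.toStr (PySem.List.pyGetD t l 0) ++ "  "
          else "     "))).map (fun col => PySem.List.pyGetD col i ""))
        = pvRow towers (PySem.List.pyGetD levels i 0) := by
      intro i hi
      rcases (PySem.List.mem_pyRange_one).1 hi with ⟨hi0, hih⟩
      have hiL : i < (levels.length : Int) := by rw [hlen]; exact hih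
      unfold pvRow
      congr 1
      rw [List.map_map]
      apply List.map_congr_left
      intro t _
      have hml : i < (((levels.map (fun l => pvCell t l)).length : Int)) := by
        simpa [List.length_map, hlen] using hih
      calc PySem.List.pyGetD (levels.map (fun l =>
              if l < (t.length : Int) then "  " ++ PySem.Int.toStr (PySem.List.pyGetD t l 0) ++ "  "
              else "     ")) i ""
          = (levels.map (fun l => pvCell t l))[i.toNat]'(by
              simpa [List.length_map, ← hlen] using (by omega : i.toNat < levels.length → i.toNat < levels.length) (by
                have := hiL; omega)) := by
            exact PySem.List.pyGetD_eq_getElem _ _ hi0 (by simpa [pvCell] using hml)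
        _ = pvCell t (levels[i.toNat]'(by have := hiL; omega)) := by
            simp
        _ = pvCell t (PySem.List.pyGetD levels i 0) := by
            rw [PySem.List.pyGetD_eq_getElem levels 0 hi0 hiL]
    rw [List.map_congr_left hstep]
    have hbase : (PySem.List.pyRange 0 ((levels.length : Nat) : Int) 1).map (fun j => PySem.List.pyGetD levels j 0) = levels :=
      PySem.List.map_pyGetD_pyRange_zero levels 0
    calc (PySem.List.pyRange 0 (h : Int) 1).map (fun i => pvRow towers (PySem.List.pyGetD levels i 0))
        = ((PySem.List.pyRange 0 (h : Int) 1).map (fun j => PySem.List.pyGetD levels j 0)).map (fun l => pvRow towers l) := by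
          rw [List.map_map]; rfl
      _ = levels.map (fun l => pvRow towers l) := by rw [← hlen] at *; rw [hbase]
  rw [hrows, List.map_map]
  rfl

-- ===== VERDICT (by name: the statement is the Claim_ definition above) =====
theorem format_towers_spec : Claim_equal_format_towers := by
  intro towers _ _
  unfold Spec_format_towers
  rw [pv_A_canon, pv_B_canon]
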